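-- pv_equiv track=rewrite | github.com/ogre-run/miniogre | miniogre_cli/actions.py | count_extensions
-- ===== SOURCE A (Python) =====
-- def count_extensions(extensions):
--     counts = {}
--     for ext in extensions:
--         if ext in counts:
--             counts[ext] += 1
--         else:
--             counts[ext] = 1
--     return counts
-- ===== SOURCE B (Python) =====
-- def count_extensions(extensions):
--     # Simpler: distinct keys in first-occurrence order, each counted by one rescan.
--     xs = list(extensions)
--     return {e: xs.count(e) for e in dict.fromkeys(xs)}
-- ===== Notes on version B (the rewrite author's own statement) =====
-- stated objective: simpler
-- what changed: Replaces the accumulating dict loop (membership test + increment/insert per element) with a one-line comprehension over the ordered distinct keys, counting each key with list.count.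
import Mathlib
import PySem

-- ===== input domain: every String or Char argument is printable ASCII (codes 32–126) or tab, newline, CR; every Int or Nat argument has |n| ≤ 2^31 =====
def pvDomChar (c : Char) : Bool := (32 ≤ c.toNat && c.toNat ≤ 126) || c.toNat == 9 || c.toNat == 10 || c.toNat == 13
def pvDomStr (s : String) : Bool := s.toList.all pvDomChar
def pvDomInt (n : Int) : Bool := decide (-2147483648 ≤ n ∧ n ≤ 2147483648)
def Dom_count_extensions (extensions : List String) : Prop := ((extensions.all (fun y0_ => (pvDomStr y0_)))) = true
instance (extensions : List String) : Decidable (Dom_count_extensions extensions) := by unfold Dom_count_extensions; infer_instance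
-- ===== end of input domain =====

-- B replaces A's single accumulating dict pass by a comprehension over the ordered
-- distinct keys that rescans the list with .count for each key (simpler, not faster).

-- ===== PORT A =====
-- A: one pass, membership test then increment or insert into the dict.
def count_extensions (extensions : List String) : List (String × Int) :=
  (extensions.foldl
    (fun (counts : PySem.Dict String Int) ext =>
      if counts.contains ext then
        counts.insert ext (counts.getD ext 0 + 1)
      else
        counts.insert ext 1)
    PySem.Dict.empty).items

-- ===== PORT B =====
-- B: distinct keys in first-occurrence order (dict.fromkeys = PySem.List.dedup),
-- each paired with its count from a rescan of the list.
def count_extensions_alt (extensions : List String) : List (String × Int) :=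
  (PySem.List.dedup extensions).map (fun e => (e, (extensions.count e : Int)))

-- ===== PRECONDITION & SPEC =====
def Spec_count_extensions (extensions : List String) (out : List (String × Int)) : Prop := out = count_extensions_alt extensions
instance (extensions : List String) (out : List (String × Int)) : Decidable (Spec_count_extensions extensions out) := by unfold Spec_count_extensions; infer_instance

-- ===== CLAIM (what is proved, stated in full; the proofs are below) =====
def Claim_equal_count_extensions : Prop := ∀ (extensions : List String), Dom_count_extensions extensions → Spec_count_extensions extensions (count_extensions extensions)

-- ===== LEMMAS AND PROOFS =====

-- A's two branches both perform counts[ext] = counts.get(ext, 0) + 1: in the else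
-- branch the key is absent, so getD is 0 and the inserted value is 1.
theorem count_extensions_fold_eq_counter (extensions : List String) :
    extensions.foldl
      (fun (counts : PySem.Dict String Int) ext =>
        if counts.contains ext then
          counts.insert ext (counts.getD ext 0 + 1)
        else
          counts.insert ext 1)
      PySem.Dict.empty = PySem.Dict.counter extensions := by
  rw [← PySem.Dict.foldl_insert_getD_add_one_eq_counter]
  apply PySem.List.foldl_congr_mem
  intro d x _
  by_cases h : d.contains x = true
  · simp [h]
  · have hb : d.contains x = false := by simpa using h
    have hg : d.get? x = none := by
      have := PySem.Dict.contains_eq_isSome_get? d x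
      rw [hb] at this
      exact Option.not_isSome_iff_eq_none.mp (by simp [← this])
    simp [h, PySem.Dict.getD, hg]

-- ===== VERDICT (by name: the statement is the Claim_ definition above) =====
theorem count_extensions_spec : Claim_equal_count_extensions := by
  intro extensions _
  show count_extensions extensions = count_extensions_alt extensions
  rw [count_extensions, count_extensions_fold_eq_counter, PySem.Dict.items_counter]
  simp [count_extensions_alt]
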